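-- pv_equiv track=rewrite | github.com/posl/comment_recommendation | script/split_gen/5_time/en/176_C/9.py | min_height_stools
-- ===== SOURCE A (Python) =====
-- def min_height_stools(people_heights):
--     stool_heights = [0] * len(people_heights)
--     stool_heights[0] = people_heights[0]
--     for i in range(1, len(people_heights)):
--         if people_heights[i] > stool_heights[i-1]:
--             stool_heights[i] = stool_heights[i-1] + 1
--         else:
--             stool_heights[i] = people_heights[i]
--     return sum(stool_heights) - sum(people_heights)
-- ===== SOURCE B (Python) =====
-- def min_height_stools(people_heights):
--     # Closed form: the stool-top at position i equals i + min_{j<=i}(h_j - j), so the answer is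
--     # (sum of prefix minima of the shifted heights h_j - j) + n*(n-1)//2 - sum(people_heights).
--     m = people_heights[0]          # same IndexError as A on the empty list
--     n = len(people_heights)
--     msum = 0
--     i = 0
--     for h in people_heights:
--         if h - i < m:
--             m = h - i
--         msum += m
--         i += 1
--     return msum + n * (n - 1) // 2 - sum(people_heights)
-- ===== Notes on version B (the rewrite author's own statement) =====
-- stated objective: alternative
-- what changed: Replaced the DP table of stool heights and its two sum passes by the closed form stool_i = i + min_{j<=i}(h_j - j): B sums the running prefix minima of the index-shifted heights and adds the triangle number n*(n-1)//2, never computing any stool height.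
import Mathlib
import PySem

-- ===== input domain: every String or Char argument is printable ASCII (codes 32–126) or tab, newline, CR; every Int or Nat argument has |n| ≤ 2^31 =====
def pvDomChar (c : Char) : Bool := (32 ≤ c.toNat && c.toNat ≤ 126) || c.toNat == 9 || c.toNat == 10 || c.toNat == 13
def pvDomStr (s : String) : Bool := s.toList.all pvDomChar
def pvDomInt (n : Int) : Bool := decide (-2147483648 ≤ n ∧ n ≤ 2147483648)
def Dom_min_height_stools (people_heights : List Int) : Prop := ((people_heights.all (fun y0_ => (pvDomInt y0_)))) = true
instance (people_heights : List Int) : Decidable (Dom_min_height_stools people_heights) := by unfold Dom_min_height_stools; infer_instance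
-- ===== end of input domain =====

-- B replaces A's DP table of stool heights + two sum passes by the closed form
-- stool_i = i + min_{j<=i}(h_j - j): it sums prefix minima of the shifted heights and
-- adds the triangle number n*(n-1)//2 (objective: alternative, same O(n) cost, O(1) space).

-- ===== PORT A =====
-- Indexing uses pyGetD/pySetD; all indices are in range on Pre_ (nonempty list), so the defaults are never used there.
def min_height_stools (people_heights : List Int) : Int :=
  let stool0 : List Int := List.replicate people_heights.length 0
  -- stool_heights[0] = people_heights[0]  (IndexError on the empty list; excluded by Pre_)
  let stool1 := PySem.List.pySetD stool0 0 (PySem.List.pyGetD people_heights 0 0)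
  let stool := (PySem.List.pyRange 1 (people_heights.length : Int) 1).foldl
    (fun st i =>
      if PySem.List.pyGetD people_heights i 0 > PySem.List.pyGetD st (i - 1) 0 then
        PySem.List.pySetD st i (PySem.List.pyGetD st (i - 1) 0 + 1)
      else
        PySem.List.pySetD st i (PySem.List.pyGetD people_heights i 0)) stool1
  stool.sum - people_heights.sum

-- ===== PORT B =====
-- Fold state is (m, msum, i): running prefix minimum of h_j - j, its running sum, the index.
def min_height_stools_alt (people_heights : List Int) : Int :=
  let m0 := PySem.List.pyGetD people_heights 0 0  -- people_heights[0] (IndexError on empty; excluded by Pre_)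
  let n : Int := people_heights.length
  let r := people_heights.foldl
    (fun (s : Int × Int × Int) h =>
      let m := if h - s.2.2 < s.1 then h - s.2.2 else s.1
      (m, s.2.1 + m, s.2.2 + 1)) (m0, 0, 0)
  r.2.1 + PySem.Int.floordiv (n * (n - 1)) 2 - people_heights.sum

-- ===== PRECONDITION & SPEC =====
-- Pre_ excludes only the empty list, on which A raises IndexError.
def Pre_min_height_stools (people_heights : List Int) : Prop := people_heights ≠ []
instance (people_heights : List Int) : Decidable (Pre_min_height_stools people_heights) := by
  unfold Pre_min_height_stools; infer_instance
def pvWitness_min_height_stools : List Int := [3, 1, 4]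

def Spec_min_height_stools (people_heights : List Int) (out : Int) : Prop := out = min_height_stools_alt people_heights
instance (people_heights : List Int) (out : Int) : Decidable (Spec_min_height_stools people_heights out) := by unfold Spec_min_height_stools; infer_instance

-- ===== CLAIM (what is proved, stated in full; the proofs are below) =====
def Claim_equal_min_height_stools : Prop := ∀ (people_heights : List Int), Dom_min_height_stools people_heights → Pre_min_height_stools people_heights → Spec_min_height_stools people_heights (min_height_stools people_heights)

-- ===== LEMMAS AND PROOFS =====

-- The stool-height table A builds, as a structural recursion (proof-only helper).
def pvStools (p : Int) : List Int → List Int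
  | [] => [p]
  | h :: t => p :: pvStools (min (p + 1) h) t

theorem pvStools_append (p a : Int) (l : List Int) :
    pvStools p (l ++ [a]) = pvStools p l ++ [min (l.foldl (fun x y => min (x + 1) y) p + 1) a] := by
  induction l generalizing p with
  | nil => simp [pvStools]
  | cons h t ih => simp [pvStools, ih]

theorem pvStools_getD_last (p : Int) (l : List Int) :
    (pvStools p l).getD l.length 0 = l.foldl (fun x y => min (x + 1) y) p := by
  induction l generalizing p with
  | nil => simp [pvStools]
  | cons h t ih => simp only [pvStools, List.length_cons, List.getD_cons_succ]; exact ih _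

theorem pvStools_length (p : Int) (l : List Int) : (pvStools p l).length = l.length + 1 := by
  induction l generalizing p with
  | nil => simp [pvStools]
  | cons h t ih => simp [pvStools, ih]

-- Sum of the indices i, i+1, … attached to the elements of l (proof-only helper).
def pvIdxSum (i : Int) : List Int → Int
  | [] => 0
  | _ :: t => i + pvIdxSum (i + 1) t

theorem pvIdxSum_two_mul (l : List Int) (i : Int) :
    2 * pvIdxSum i l = l.length * (2 * i + l.length - 1) := by
  induction l generalizing i with
  | nil => simp [pvIdxSum]
  | cons h t ih =>
    simp only [pvIdxSum, List.length_cons]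
    rw [mul_add, ih (i + 1)]
    push_cast
    ring

-- B's fold computes, from state (m, 0, i), the sum of the stool heights whose previous
-- stool top is m + i - 1, minus that previous top and minus the index sum.
theorem pvFoldB (l : List Int) (m acc i : Int) :
    (l.foldl (fun (s : Int × Int × Int) h =>
        let m' := if h - s.2.2 < s.1 then h - s.2.2 else s.1
        (m', s.2.1 + m', s.2.2 + 1)) (m, acc, i)).2.1
      = acc + ((pvStools (m + i - 1) l).sum - (m + i - 1)) - pvIdxSum i l := by
  induction l generalizing m acc i with
  | nil => simp [pvStools, pvIdxSum]
  | cons h t ih =>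
    simp only [List.foldl_cons]
    rw [ih]
    have hmin : (if h - i < m then h - i else m) + (i + 1) - 1 = min (m + i - 1 + 1) h := by
      split_ifs with hc <;> omega
    simp only [pvStools, pvIdxSum, List.sum_cons, hmin]
    have hmin2 : (if h - i < m then h - i else m) = min (m + i - 1 + 1) h - i := by
      split_ifs with hc <;> omega
    rw [hmin2]
    ring

-- A's fold over range(1, m+1) fills the first m+1 slots with the table, leaving zeros after.
theorem pvFoldA (h0 : Int) (t : List Int) (m : Nat) (hm : m ≤ t.length) :
    (PySem.List.pyRange 1 ((m : Int) + 1) 1).foldl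
      (fun st i =>
        if PySem.List.pyGetD (h0 :: t) i 0 > PySem.List.pyGetD st (i - 1) 0 then
          PySem.List.pySetD st i (PySem.List.pyGetD st (i - 1) 0 + 1)
        else
          PySem.List.pySetD st i (PySem.List.pyGetD (h0 :: t) i 0))
      (h0 :: List.replicate t.length 0)
    = pvStools h0 (t.take m) ++ List.replicate (t.length - m) 0 := by
  induction m with
  | zero =>
    rw [show ((0 : Nat) : Int) + 1 = 1 by norm_num, PySem.List.pyRange_one_eq_nil (by omega)]
    simp [pvStools]
  | succ m ih =>
    have hm' : m ≤ t.length := by omega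
    rw [show ((m + 1 : Nat) : Int) + 1 = ((m : Int) + 1) + 1 by push_cast; ring,
        PySem.List.pyRange_one_succ_right (by omega), List.foldl_append, ih hm']
    have hmlt : m < t.length := by omega
    have hSlen : (pvStools h0 (t.take m)).length = m + 1 := by
      rw [pvStools_length, List.length_take]; omega
    simp only [List.foldl_cons, List.foldl_nil]
    have htm : m = (t.take m).length := by rw [List.length_take]; omega
    have hprev : PySem.List.pyGetD (pvStools h0 (t.take m) ++ List.replicate (t.length - m) 0) ((m : Int) + 1 - 1) 0
        = (t.take m).foldl (fun x y => min (x + 1) y) h0 := by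
      rw [show (m : Int) + 1 - 1 = ((m : Nat) : Int) by ring, PySem.List.pyGetD_natCast, List.getD_append _ _ _ _ (by omega)]
      have h3 := pvStools_getD_last h0 (t.take m)
      rw [List.length_take, Nat.min_eq_left (by omega)] at h3
      exact h3
    have hh : PySem.List.pyGetD (h0 :: t) ((m : Int) + 1) 0 = t.getD m 0 := by
      rw [show (m : Int) + 1 = ((m + 1 : Nat) : Int) by push_cast; ring, PySem.List.pyGetD_natCast,
        List.getD_cons_succ]
    have hset : ∀ v : Int, PySem.List.pySetD (pvStools h0 (t.take m) ++ List.replicate (t.length - m) 0) ((m : Int) + 1) v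
        = pvStools h0 (t.take m) ++ v :: List.replicate (t.length - (m + 1)) 0 := by
      intro v
      rw [show (m : Int) + 1 = ((m + 1 : Nat) : Int) by push_cast; ring, PySem.List.pySetD_natCast,
        List.set_append, if_neg (by omega), hSlen,
        show m + 1 - (m + 1) = 0 by omega,
        show t.length - m = (t.length - (m + 1)) + 1 by omega, List.replicate_succ, List.set_cons_zero]
    have hrhs : pvStools h0 (t.take (m + 1)) ++ List.replicate (t.length - (m + 1)) 0
        = pvStools h0 (t.take m) ++ (min ((t.take m).foldl (fun x y => min (x + 1) y) h0 + 1) (t.getD m 0)) :: List.replicate (t.length - (m + 1)) 0 := by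
      rw [List.take_add_one, List.getElem?_eq_getElem hmlt, Option.toList_some, pvStools_append]
      simp [List.getD, List.getElem?_eq_getElem hmlt]
    rw [hprev, hh, hrhs]
    by_cases hc : t.getD m 0 > (t.take m).foldl (fun x y => min (x + 1) y) h0
    · rw [if_pos hc, hset]
      congr 2
      omega
    · rw [if_neg hc, hset]
      congr 2
      omega

theorem min_height_stools_spec_aux (h0 : Int) (t : List Int) :
    min_height_stools (h0 :: t) = min_height_stools_alt (h0 :: t) := by
  unfold min_height_stools min_height_stools_alt
  simp only [List.length_cons, List.replicate_succ, PySem.List.pyGetD_zero_cons]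
  have hinit : PySem.List.pySetD (0 :: List.replicate t.length 0) 0 h0
      = h0 :: List.replicate t.length 0 := by
    simp [PySem.List.pySetD, PySem.List.pySet?, PySem.List.pyIdx?]
  rw [hinit, show ((t.length + 1 : Nat) : Int) = (t.length : Int) + 1 by push_cast; ring,
    pvFoldA h0 t t.length (le_refl _), List.take_length, Nat.sub_self, List.replicate_zero,
    List.append_nil, pvFoldB (h0 :: t) h0 0 0]
  -- pvStools (h0 + 0 - 1) (h0 :: t) = (h0 - 1) :: pvStools h0 t, since min (h0 - 1 + 1) h0 = h0
  have hstep : pvStools (h0 + 0 - 1) (h0 :: t) = (h0 - 1) :: pvStools h0 t := by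
    simp [pvStools]
  have htri : PySem.Int.floordiv (((t.length : Int) + 1) * ((t.length : Int) + 1 - 1)) 2
      = pvIdxSum 0 (h0 :: t) := by
    have h2 := pvIdxSum_two_mul (h0 :: t) 0
    simp only [List.length_cons] at h2
    have : ((t.length : Int) + 1) * ((t.length : Int) + 1 - 1) = 2 * pvIdxSum 0 (h0 :: t) := by
      rw [h2]; push_cast; ring
    rw [this, PySem.Int.floordiv_eq_ediv_of_pos (by norm_num), Int.mul_ediv_cancel_left _ (by norm_num)]
  rw [hstep, htri]
  simp only [List.sum_cons]
  ring

-- ===== VERDICT (by name: the statement is the Claim_ definition above) =====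
theorem min_height_stools_spec : Claim_equal_min_height_stools := by
  intro ph _ hpre
  unfold Spec_min_height_stools
  match ph, hpre with
  | h0 :: t, _ => exact min_height_stools_spec_aux h0 t
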